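-- pv_equiv track=rewrite | github.com/gitboss/IPOLockInDetailsExtraction | parser_shp_strategies_old.py | detect_columns_from_whitespace
-- ===== SOURCE A (Python) =====
-- from typing import List, Tuple, Optional, Dict
--
-- def detect_columns_from_whitespace(line: str) -> Optional[List[Tuple[int, int]]]:
--     """
--     Detect column positions from whitespace gaps in a line.
--     Returns list of (start, end) positions for each column.
--     """
--     if not line:
--         return None
--
--     # Simple implementation: detect continuous number groups
--     columns = []
--     in_column = False
--     start = 0
--
--     for i, char in enumerate(line):
--         if char.isdigit() or char == ',':
--             if not in_column:
--                 start = i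
--                 in_column = True
--         else:
--             if in_column:
--                 columns.append((start, i))
--                 in_column = False
--
--     if in_column:
--         columns.append((start, len(line)))
--
--     return columns if len(columns) >= 2 else None
-- ===== SOURCE B (Python) =====
-- from typing import List, Tuple, Optional
--
-- def detect_columns_from_whitespace(line: str) -> Optional[List[Tuple[int, int]]]:
--     if not line:
--         return None
--     # Staged vectorised decomposition: predicate vector, then edge detection by
--     # comparing with the shifted vector, then zip rising edges with falling edges.
--     p = [c.isdigit() or c == ',' for c in line]
--     pairs = list(enumerate(zip(p, [False] + p)))
--     starts = [i for i, (cur, prev) in pairs if cur and not prev]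
--     ends = [i for i, (cur, prev) in pairs if prev and not cur]
--     if p[-1]:
--         ends.append(len(p))
--     columns = list(zip(starts, ends))
--     return columns if len(columns) >= 2 else None
-- ===== Notes on version B (the rewrite author's own statement) =====
-- stated objective: alternative
-- what changed: Replaced the char-by-char in_column/start state machine with staged vector passes: build the predicate vector, detect rising/falling edges by zipping it with its shifted copy, then zip the edge lists into spans.
import Mathlib
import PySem

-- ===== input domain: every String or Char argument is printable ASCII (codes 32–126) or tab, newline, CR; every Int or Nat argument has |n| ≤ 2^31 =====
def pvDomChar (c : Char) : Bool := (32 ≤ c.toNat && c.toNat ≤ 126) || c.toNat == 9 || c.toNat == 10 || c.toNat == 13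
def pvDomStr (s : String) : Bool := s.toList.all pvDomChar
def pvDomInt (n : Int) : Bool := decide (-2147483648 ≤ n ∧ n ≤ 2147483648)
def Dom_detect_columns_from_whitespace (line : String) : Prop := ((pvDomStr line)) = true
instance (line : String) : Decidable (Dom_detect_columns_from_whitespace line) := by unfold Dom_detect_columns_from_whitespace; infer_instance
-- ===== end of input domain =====

-- B replaces A's char-by-char in_column/start state machine by a staged, vectorised
-- decomposition: predicate vector, edge detection by zipping with the shifted vector,
-- then zipping rising with falling edges (objective: alternative decomposition, same O(n)).

-- char.isdigit() or char == ','
def pvP (c : Char) : Bool := PySem.Chars.isdigit c || c == ','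

-- ===== PORT A =====
-- the 'for i, char in enumerate(line)' loop, state (columns, in_column, start)
def pvALoop : List Char → Int → (List (Int × Int) × Bool × Int) → List (Int × Int) × Bool × Int
  | [], _, st => st
  | c :: cs, i, (cols, inCol, start) =>
    if pvP c then
      if !inCol then pvALoop cs (i + 1) (cols, true, i)
      else pvALoop cs (i + 1) (cols, inCol, start)
    else
      if inCol then pvALoop cs (i + 1) (cols ++ [(start, i)], false, start)
      else pvALoop cs (i + 1) (cols, inCol, start)

def detect_columns_from_whitespace (line : String) : Option (List (Int × Int)) :=
  if line = "" then none
  else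
    let st := pvALoop line.toList 0 ([], false, 0)
    let cols := if st.2.1 then st.1 ++ [(st.2.2, (line.toList.length : Int))] else st.1
    if 2 ≤ cols.length then some cols else none

-- ===== PORT B =====
-- p = [pvP(c) for c in line]; pairs = enumerate(zip(p, [False] + p));
-- starts/ends are the rising/falling edges; p[-1] on the nonempty p is p.getLastD false.
def detect_columns_from_whitespace_alt (line : String) : Option (List (Int × Int)) :=
  if line = "" then none
  else
    let p := line.toList.map pvP
    let pairs := PySem.List.enumerate (p.zip (false :: p)) 0
    let starts := (pairs.filter (fun x => x.2.1 && !x.2.2)).map (fun x => x.1)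
    let ends0 := (pairs.filter (fun x => x.2.2 && !x.2.1)).map (fun x => x.1)
    let ends := if p.getLastD false then ends0 ++ [(p.length : Int)] else ends0
    let cols := starts.zip ends
    if 2 ≤ cols.length then some cols else none

-- ===== PRECONDITION & SPEC =====
def Spec_detect_columns_from_whitespace (line : String) (out : Option (List (Int × Int))) : Prop := out = detect_columns_from_whitespace_alt line
instance (line : String) (out : Option (List (Int × Int))) : Decidable (Spec_detect_columns_from_whitespace line out) := by unfold Spec_detect_columns_from_whitespace; infer_instance

-- ===== CLAIM (what is proved, stated in full; the proofs are below) =====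
def Claim_equal_detect_columns_from_whitespace : Prop := ∀ (line : String), Dom_detect_columns_from_whitespace line → Spec_detect_columns_from_whitespace line (detect_columns_from_whitespace line)

-- ===== LEMMAS AND PROOFS =====

-- A's result after the loop including the trailing flush, end index given explicitly
def pvFin (st : List (Int × Int) × Bool × Int) (e : Int) : List (Int × Int) :=
  if st.2.1 then st.1 ++ [(st.2.2, e)] else st.1

-- rising edges of a boolean vector, given previous value
def pvSt : List Bool → Int → Bool → List Int
  | [], _, _ => []
  | b :: bs, i, prev => if b && !prev then i :: pvSt bs (i + 1) b else pvSt bs (i + 1) b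

-- falling edges (including the end-of-list flush), given previous value
def pvEn : List Bool → Int → Bool → List Int
  | [], i, prev => if prev then [i] else []
  | b :: bs, i, prev => if prev && !b then i :: pvEn bs (i + 1) b else pvEn bs (i + 1) b

theorem pvStarts_eq : ∀ (p : List Bool) (i : Int) (prev : Bool),
    ((PySem.List.enumerate (p.zip (prev :: p)) i).filter
        (fun x => x.2.1 && !x.2.2)).map (fun x => x.1) = pvSt p i prev := by
  intro p
  induction p with
  | nil => intro i prev; simp [PySem.List.enumerate_nil, pvSt]
  | cons b bs ih =>
    intro i prev
    rw [List.zip_cons_cons, PySem.List.enumerate_cons, pvSt]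
    by_cases h : (b && !prev) = true
    · simp [h, ih (i + 1) b]
    · simp only [List.filter_cons, h, Bool.false_eq_true, if_false, ih (i + 1) b]

theorem pvEnds_eq : ∀ (p : List Bool) (i : Int) (prev : Bool),
    ((PySem.List.enumerate (p.zip (prev :: p)) i).filter
        (fun x => x.2.2 && !x.2.1)).map (fun x => x.1)
      ++ (if p.getLastD prev then [i + (p.length : Int)] else []) = pvEn p i prev := by
  intro p
  induction p with
  | nil => intro i prev; simp [PySem.List.enumerate_nil, pvEn]
  | cons b bs ih =>
    intro i prev
    rw [List.zip_cons_cons, PySem.List.enumerate_cons, pvEn]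
    have hlast : (b :: bs).getLastD prev = bs.getLastD b := by
      cases bs <;> simp [List.getLastD]
    have harith : i + ((b :: bs).length : Int) = (i + 1) + (bs.length : Int) := by
      simp only [List.length_cons]; push_cast; ring
    rw [hlast, harith]
    by_cases h : (prev && !b) = true
    · simp only [List.filter_cons, h, if_true, List.map_cons, List.cons_append]
      rw [ih (i + 1) b]
    · simp only [List.filter_cons, h, Bool.false_eq_true, if_false]
      rw [ih (i + 1) b]

theorem pvMain : ∀ (cs : List Char) (i : Int) (cols : List (Int × Int)) (s : Int),
    (pvFin (pvALoop cs i (cols, false, s)) (i + (cs.length : Int))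
        = cols ++ (pvSt (cs.map pvP) i false).zip (pvEn (cs.map pvP) i false))
    ∧ (pvFin (pvALoop cs i (cols, true, s)) (i + (cs.length : Int))
        = cols ++ (s :: pvSt (cs.map pvP) i true).zip (pvEn (cs.map pvP) i true)) := by
  intro cs
  induction cs with
  | nil =>
    intro i cols s
    constructor
    · simp [pvALoop, pvFin, pvSt, pvEn]
    · simp [pvALoop, pvFin, pvSt, pvEn]
  | cons c cs ih =>
    intro i cols s
    have harith : i + (((c :: cs).length : Nat) : Int) = (i + 1) + (cs.length : Int) := by
      simp only [List.length_cons]; push_cast; ring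
    by_cases hc : pvP c = true
    · constructor
      · rw [pvALoop]
        simp only [hc, if_true, Bool.not_false]
        rw [harith, (ih (i + 1) cols i).2]
        simp only [List.map_cons, pvSt, pvEn, hc]
        simp
      · rw [pvALoop]
        simp only [hc, if_true, Bool.not_true, Bool.false_eq_true, if_false]
        rw [harith, (ih (i + 1) cols s).2]
        simp only [List.map_cons, pvSt, pvEn, hc]
        simp
    · rw [Bool.not_eq_true] at hc
      constructor
      · rw [pvALoop]
        simp only [hc, Bool.false_eq_true, if_false]
        rw [harith, (ih (i + 1) cols s).1]
        simp only [List.map_cons, pvSt, pvEn, hc]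
        simp
      · rw [pvALoop]
        simp only [hc, Bool.false_eq_true, if_false, if_true]
        rw [harith, (ih (i + 1) (cols ++ [(s, i)]) s).1]
        simp only [List.map_cons, pvSt, pvEn, hc]
        simp [List.zip_cons_cons]

-- ===== VERDICT (by name: the statement is the Claim_ definition above) =====
theorem detect_columns_from_whitespace_spec : Claim_equal_detect_columns_from_whitespace := by
  intro line _
  unfold Spec_detect_columns_from_whitespace detect_columns_from_whitespace
    detect_columns_from_whitespace_alt
  by_cases h : line = ""
  · simp [h]
  · simp only [h, if_false]
    have hA := (pvMain line.toList 0 [] 0).1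
    simp only [zero_add, List.nil_append] at hA
    rw [show (if (pvALoop line.toList 0 ([], false, 0)).2.1 then
          (pvALoop line.toList 0 ([], false, 0)).1
            ++ [((pvALoop line.toList 0 ([], false, 0)).2.2, (line.toList.length : Int))]
        else (pvALoop line.toList 0 ([], false, 0)).1)
      = pvFin (pvALoop line.toList 0 ([], false, 0)) ((line.toList.length : Int)) from rfl]
    rw [hA]
    have hS := pvStarts_eq (line.toList.map pvP) 0 false
    have hE := pvEnds_eq (line.toList.map pvP) 0 false
    simp only [zero_add] at hE
    rw [hS]
    rw [show (if (line.toList.map pvP).getLastD false then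
          ((PySem.List.enumerate ((line.toList.map pvP).zip (false :: line.toList.map pvP)) 0).filter
              (fun x => x.2.2 && !x.2.1)).map (fun x => x.1)
            ++ [((line.toList.map pvP).length : Int)]
        else ((PySem.List.enumerate ((line.toList.map pvP).zip (false :: line.toList.map pvP)) 0).filter
              (fun x => x.2.2 && !x.2.1)).map (fun x => x.1))
      = ((PySem.List.enumerate ((line.toList.map pvP).zip (false :: line.toList.map pvP)) 0).filter
              (fun x => x.2.2 && !x.2.1)).map (fun x => x.1)
          ++ (if (line.toList.map pvP).getLastD false then [((line.toList.map pvP).length : Int)] else []) from by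
        split <;> simp]
    rw [hE]
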